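-- pv_equiv track=rewrite | github.com/skibidichungus/textbook-companion | src/textbook_companion/ingest.py | _parse_chapter_num
-- ===== SOURCE A (Python) =====
-- def _parse_chapter_num(token: str) -> int:
--     """Convert a decimal string or Roman numeral to int."""
--     token = token.strip().upper()
--     if token.isdigit():
--         return int(token)
--     # Roman numeral decoder (handles I–MMMCMXCIX)
--     roman_values = {
--         "M": 1000, "CM": 900, "D": 500, "CD": 400,
--         "C": 100, "XC": 90, "L": 50, "XL": 40,
--         "X": 10, "IX": 9, "V": 5, "IV": 4, "I": 1,
--     }
--     result = 0
--     i = 0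
--     while i < len(token):
--         two = token[i : i + 2]
--         if two in roman_values:
--             result += roman_values[two]
--             i += 2
--         elif token[i] in roman_values:
--             result += roman_values[token[i]]
--             i += 1
--         else:
--             # Not a recognisable Roman numeral — treat as 0 so the caller
--             # can discard this match.
--             return 0
--     return result
-- ===== SOURCE B (Python) =====
-- def _parse_chapter_num(token: str) -> int:
--     """Convert a decimal string or Roman numeral to int."""
--     token = token.strip().upper()
--     if token.isdigit():
--         return int(token)
--     vals = {"M": 1000, "D": 500, "C": 100, "L": 50, "X": 10, "V": 5, "I": 1}
--     if any(c not in vals for c in token):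
--         return 0
--     subtractive = {("C", "M"), ("C", "D"), ("X", "C"), ("X", "L"), ("I", "X"), ("I", "V")}
--     total = 0
--     prev = None  # previous char, if still available as the start of a subtractive pair
--     for c in token:
--         if prev is not None and (prev, c) in subtractive:
--             total += vals[c] - 2 * vals[prev]
--             prev = None
--         else:
--             total += vals[c]
--             prev = c
--     return total
-- ===== Notes on version B (the rewrite author's own statement) =====
-- stated objective: alternative
-- what changed: Replaces A's index/slice loop with greedy two-char dict lookups by a one-shot validity check followed by a single character-by-character fold that adds each letter's value and applies a subtraction adjustment when the previous unconsumed letter forms one of the six subtractive pairs.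
import Mathlib
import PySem

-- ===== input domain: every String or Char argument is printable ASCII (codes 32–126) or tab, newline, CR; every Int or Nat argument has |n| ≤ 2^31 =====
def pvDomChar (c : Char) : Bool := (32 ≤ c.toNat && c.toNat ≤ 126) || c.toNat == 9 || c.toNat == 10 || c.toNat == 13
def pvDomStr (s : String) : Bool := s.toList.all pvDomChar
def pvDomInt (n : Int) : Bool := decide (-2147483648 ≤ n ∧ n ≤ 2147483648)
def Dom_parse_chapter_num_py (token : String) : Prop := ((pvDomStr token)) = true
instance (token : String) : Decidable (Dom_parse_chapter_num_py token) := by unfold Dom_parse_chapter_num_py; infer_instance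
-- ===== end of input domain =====

-- B replaces A's greedy two-char-slice tokenizer by a validity check plus a single
-- per-character fold with a subtractive-pair adjustment (objective: alternative).

-- ===== PORT A =====
-- roman_values lookup of a 1- or 2-char key (token[i:i+2] or token[i])
def pvzRomanVal? (l : List Char) : Option Int :=
  match l with
  | ['M'] => some 1000
  | ['C','M'] => some 900
  | ['D'] => some 500
  | ['C','D'] => some 400
  | ['C'] => some 100
  | ['X','C'] => some 90
  | ['L'] => some 50
  | ['X','L'] => some 40
  | ['X'] => some 10
  | ['I','X'] => some 9
  | ['V'] => some 5
  | ['I','V'] => some 4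
  | ['I'] => some 1
  | _ => none

-- A's while loop over index i, transcribed as recursion on the remaining suffix
def pvzALoop (result : Int) (l : List Char) : Int :=
  match l with
  | [] => result
  | c :: rest =>
    let two := c :: rest.take 1          -- token[i : i + 2]
    match pvzRomanVal? two with
    | some v => pvzALoop (result + v) (rest.drop 1)
    | none =>
      match pvzRomanVal? [c] with
      | some v => pvzALoop (result + v) rest
      | none => 0
  termination_by l.length
  decreasing_by
  · simp only [List.length_drop, List.length_cons]; omega
  · simp only [List.length_cons]; omega

def parse_chapter_num_py (token : String) : Int :=
  let t := PySem.Str.upper (PySem.Str.strip token)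
  if PySem.Str.strIsdigit t then
    (PySem.Int.ofStr? t).getD 0          -- isdigit ⇒ int(t) succeeds; the default is unreachable
  else
    pvzALoop 0 t.toList

-- ===== PORT B =====
def pvzVal (c : Char) : Int :=
  if c = 'M' then 1000 else if c = 'D' then 500 else if c = 'C' then 100
  else if c = 'L' then 50 else if c = 'X' then 10 else if c = 'V' then 5 else 1

def pvzValid (c : Char) : Bool := decide (c ∈ (['M','D','C','L','X','V','I'] : List Char))

def pvzSubPair (a b : Char) : Bool :=
  decide ((a, b) ∈ ([('C','M'),('C','D'),('X','C'),('X','L'),('I','X'),('I','V')] : List (Char × Char)))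

def pvzBStep (st : Int × Option Char) (c : Char) : Int × Option Char :=
  match st.2 with
  | some p => if pvzSubPair p c then (st.1 + pvzVal c - 2 * pvzVal p, none)
              else (st.1 + pvzVal c, some c)
  | none => (st.1 + pvzVal c, some c)

def parse_chapter_num_py_alt (token : String) : Int :=
  let t := PySem.Str.upper (PySem.Str.strip token)
  if PySem.Str.strIsdigit t then
    (PySem.Int.ofStr? t).getD 0
  else if t.toList.all pvzValid then
    (t.toList.foldl pvzBStep (0, none)).1
  else 0

-- ===== PRECONDITION & SPEC =====
def Spec_parse_chapter_num_py (token : String) (out : Int) : Prop := out = parse_chapter_num_py_alt token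
instance (token : String) (out : Int) : Decidable (Spec_parse_chapter_num_py token out) := by unfold Spec_parse_chapter_num_py; infer_instance

-- ===== CLAIM (what is proved, stated in full; the proofs are below) =====
def Claim_equal_parse_chapter_num_py : Prop := ∀ (token : String), Dom_parse_chapter_num_py token → Spec_parse_chapter_num_py token (parse_chapter_num_py token)

-- ===== LEMMAS AND PROOFS =====

lemma pvzRomanVal?_single (c : Char) (h : pvzValid c = true) :
    pvzRomanVal? [c] = some (pvzVal c) := by
  have h' := of_decide_eq_true h
  fin_cases h' <;> decide

lemma pvzRomanVal?_pair (a b : Char) (ha : pvzValid a = true) (hb : pvzValid b = true) :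
    pvzRomanVal? [a, b] = if pvzSubPair a b then some (pvzVal b - pvzVal a) else none := by
  have ha' := of_decide_eq_true ha
  have hb' := of_decide_eq_true hb
  fin_cases ha' <;> fin_cases hb' <;> decide

lemma pvzRomanVal?_valid (l : List Char) (v : Int) (h : pvzRomanVal? l = some v) :
    l.all pvzValid = true := by
  unfold pvzRomanVal? at h
  split at h <;> first | decide | exact absurd h (by simp)

-- A's accumulator shifts out of the loop on all-valid input
lemma pvzALoop_shift : ∀ (n : Nat) (l : List Char), l.length ≤ n → l.all pvzValid = true →
    ∀ acc, pvzALoop acc l = acc + pvzALoop 0 l := by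
  intro n
  induction n with
  | zero =>
    intro l hl _ acc
    have hnil : l = [] := List.length_eq_zero_iff.mp (Nat.le_zero.mp hl)
    subst hnil; simp [pvzALoop]
  | succ n ih =>
    intro l hl hv acc
    match l with
    | [] => simp [pvzALoop]
    | c :: rest =>
      simp only [List.all_cons, Bool.and_eq_true] at hv
      rw [pvzALoop, pvzALoop]
      cases hr : pvzRomanVal? (c :: rest.take 1) with
      | some v =>
        simp only [hr]
        have hval : (rest.drop 1).all pvzValid = true := by
          rw [List.all_eq_true] at hv ⊢
          intro x hx; exact hv.2 x (List.mem_of_mem_drop hx)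
        have hlen : (rest.drop 1).length ≤ n := by
          simp only [List.length_drop]
          simp at hl; omega
        rw [ih _ hlen hval (acc + v), ih _ hlen hval (0 + v)]
        ring
      | none =>
        simp only [hr]
        cases h1 : pvzRomanVal? [c] with
        | some v =>
          simp only [h1]
          have hlen : rest.length ≤ n := by simp at hl; omega
          rw [ih _ hlen hv.2 (acc + v), ih _ hlen hv.2 (0 + v)]
          ring
        | none =>
          exact absurd (pvzRomanVal?_single c hv.1) (by simp [h1])

-- the fold of B computes A's loop on all-valid input, for both prev-states
lemma pvzMain : ∀ (n : Nat) (l : List Char), l.length ≤ n → l.all pvzValid = true → ∀ s : Int,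
    ((l.foldl pvzBStep (s, none)).1 = s + pvzALoop 0 l) ∧
    (∀ p, pvzValid p = true →
      (l.foldl pvzBStep (s, some p)).1 = s - pvzVal p + pvzALoop 0 (p :: l)) := by
  intro n
  induction n with
  | zero =>
    intro l hl _ s
    have hnil : l = [] := List.length_eq_zero_iff.mp (Nat.le_zero.mp hl)
    subst hnil
    refine ⟨by simp [pvzALoop], ?_⟩
    intro p hp
    rw [pvzALoop]
    simp only [List.take_nil, List.foldl_nil]
    rw [pvzRomanVal?_single p hp]
    simp [pvzALoop]
  | succ n ih =>
    intro l hl hv s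
    match l with
    | [] =>
      refine ⟨by simp [pvzALoop], ?_⟩
      intro p hp
      rw [pvzALoop]
      simp only [List.take_nil, List.foldl_nil]
      rw [pvzRomanVal?_single p hp]
      simp [pvzALoop]
    | c :: rest =>
      simp only [List.all_cons, Bool.and_eq_true] at hv
      have hlen : rest.length ≤ n := by simp at hl; omega
      constructor
      · -- prev = none: consume c into the prev slot
        simp only [List.foldl_cons, pvzBStep]
        have := (ih rest hlen hv.2 (s + pvzVal c)).2 c hv.1
        rw [this]; ring
      · intro p hp
        simp only [List.foldl_cons, pvzBStep]
        rw [pvzALoop]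
        simp only [List.take_succ_cons, List.take_zero]
        rw [pvzRomanVal?_pair p c hp hv.1]
        cases hsub : pvzSubPair p c with
        | true =>
          simp only [if_true]
          have hdrop : (c :: rest).drop 1 = rest := by simp
          rw [hdrop]
          rw [pvzALoop_shift n rest hlen hv.2 (0 + (pvzVal c - pvzVal p))]
          rw [(ih rest hlen hv.2 (s + pvzVal c - 2 * pvzVal p)).1]
          ring
        | false =>
          simp only [Bool.false_eq_true, if_false]
          rw [pvzRomanVal?_single p hp]
          show _ = s - pvzVal p + pvzALoop (0 + pvzVal p) (c :: rest)
          have hall : (c :: rest).all pvzValid = true := by simp [hv.1, hv.2]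
          rw [pvzALoop_shift (c :: rest).length (c :: rest) le_rfl hall (0 + pvzVal p)]
          rw [(ih rest hlen hv.2 (s + pvzVal c)).2 c hv.1]
          ring

-- invalid letter anywhere ⇒ A's loop returns 0
lemma pvzALoop_invalid : ∀ (n : Nat) (l : List Char), l.length ≤ n → l.all pvzValid = false →
    ∀ acc, pvzALoop acc l = 0 := by
  intro n
  induction n with
  | zero =>
    intro l hl hv acc
    have hnil : l = [] := List.length_eq_zero_iff.mp (Nat.le_zero.mp hl)
    subst hnil; simp at hv
  | succ n ih =>
    intro l hl hv acc
    match l with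
    | [] => simp at hv
    | c :: rest =>
      rw [pvzALoop]
      cases hr : pvzRomanVal? (c :: rest.take 1) with
      | some v =>
        simp only [hr]
        have htwo := pvzRomanVal?_valid _ _ hr
        simp only [List.all_cons, Bool.and_eq_true] at htwo
        apply ih
        · simp only [List.length_drop]; simp at hl; omega
        · simp only [List.all_cons, htwo.1, Bool.true_and] at hv
          cases rest with
          | nil => simp at hv
          | cons r rest' =>
            simp only [List.take_succ_cons, List.take_zero, List.all_cons, Bool.and_eq_true] at htwo
            simp only [List.all_cons, htwo.2.1, Bool.true_and] at hv
            simpa using hv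
      | none =>
        simp only [hr]
        cases h1 : pvzRomanVal? [c] with
        | some v =>
          simp only [h1]
          have hc := pvzRomanVal?_valid _ _ h1
          simp only [List.all_cons, List.all_nil, Bool.and_true] at hc
          apply ih
          · simp at hl; omega
          · simp only [List.all_cons, hc, Bool.true_and] at hv; exact hv
        | none => simp

-- ===== VERDICT (by name: the statement is the Claim_ definition above) =====
theorem parse_chapter_num_py_spec : Claim_equal_parse_chapter_num_py := by
  intro token _
  unfold Spec_parse_chapter_num_py parse_chapter_num_py parse_chapter_num_py_alt
  set t := PySem.Str.upper (PySem.Str.strip token) with ht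
  dsimp only []
  split
  · rfl
  · cases hv : t.toList.all pvzValid with
    | true =>
      rw [if_pos rfl, (pvzMain t.toList.length t.toList le_rfl hv 0).1]
      ring
    | false =>
      rw [if_neg (by simp)]
      exact pvzALoop_invalid t.toList.length t.toList le_rfl hv 0
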